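-- pv_equiv track=rewrite | github.com/guokunsg/study | Algo/Codility.py | MinMaxDivision
-- ===== SOURCE A (Python) =====
-- def canBeDivided(A, K, max_sum):
--     sum = 0 # Used to store the sum of each division
--     count = 0 # division count
--     for e in A:
--         if sum + e > max_sum: # current division sum > max_sum, so have to start a new division
--             sum = e
--             count += 1
--         else:
--             sum += e
--         if count >= K:
--             return False
--     return True
--
-- def MinMaxDivision(K, M, A):
--     floor_sum = max(A)
--     top_sum = sum(A)
--     while floor_sum <= top_sum: # Binary search trying
--         mid = (floor_sum + top_sum) // 2
--         if canBeDivided(A, K, mid):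
--             top_sum = top_sum - 1
--         else:
--             floor_sum = floor_sum + 1
--     return floor_sum
-- ===== SOURCE B (Python) =====
-- def MinMaxDivision(K, M, A):
--     # Binary search on the answer over the half-open range [max(A), sum(A)+1),
--     # keeping the invariant that the answer lies in [lo, hi]; the block counter
--     # is a single fold over A carrying a (current_sum, block_count) state pair.
--     def blocks(cap):
--         state = (0, 1)
--         for e in A:
--             cur, cnt = state
--             state = (e, cnt + 1) if cur + e > cap else (cur + e, cnt)
--         return state[1]
--
--     lo, hi = max(A), sum(A) + 1
--     while lo < hi:
--         mid = lo + (hi - lo) // 2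
--         if blocks(mid) <= K:
--             hi = mid
--         else:
--             lo = mid + 1
--     return lo
-- ===== Notes on version B (the rewrite author's own statement) =====
-- stated objective: alternative
-- what changed: A shrinks the candidate range [max(A), sum(A)] by exactly 1 per greedy feasibility test (its 'mid' only selects which endpoint moves), while B runs a true half-open binary search [lo,hi) that jumps hi down to mid / lo to mid+1, halving the range per test, with the feasibility test rewritten as a single fold carrying a (current_sum, block_count) pair compared to K instead of A's early-returning counter.
-- outside the precondition, e.g. on MinMaxDivision(2, 0, []): A raises ValueError, B raises ValueError; on MinMaxDivision(2, 0, [6, 4, -6, 7, 4]): A returns 11, B returns 9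
import Mathlib
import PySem

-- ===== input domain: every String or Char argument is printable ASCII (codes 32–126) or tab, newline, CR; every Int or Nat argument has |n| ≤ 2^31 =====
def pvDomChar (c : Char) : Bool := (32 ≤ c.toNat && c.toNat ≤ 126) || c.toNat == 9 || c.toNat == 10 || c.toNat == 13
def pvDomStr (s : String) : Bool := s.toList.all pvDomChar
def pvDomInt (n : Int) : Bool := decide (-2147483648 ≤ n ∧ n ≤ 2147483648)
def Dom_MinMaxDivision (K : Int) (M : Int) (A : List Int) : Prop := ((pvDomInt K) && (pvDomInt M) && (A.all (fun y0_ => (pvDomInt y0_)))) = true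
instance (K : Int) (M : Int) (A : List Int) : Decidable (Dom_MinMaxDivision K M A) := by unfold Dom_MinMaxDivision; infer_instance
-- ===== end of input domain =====

-- B replaces A's shrink-by-1 scan of [max(A), sum(A)] by a half-open binary search with a
-- fold-based block counter; equivalence proved on nonempty lists of nonnegative ints.


-- ===== PORT A =====
-- canBeDivided's for-loop with early return, state (sum, count)
def canBeDividedGo (K maxSum : Int) : List Int → Int → Int → Bool
  | [], _, _ => true
  | e :: rest, sum, count =>
    let sum' := if sum + e > maxSum then e else sum + e
    let count' := if sum + e > maxSum then count + 1 else count
    if count' ≥ K then false else canBeDividedGo K maxSum rest sum' count'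

def canBeDivided (A : List Int) (K : Int) (maxSum : Int) : Bool :=
  canBeDividedGo K maxSum A 0 0

-- A's while loop: shrink one endpoint by 1 depending on the test at mid
def loopA (A : List Int) (K : Int) (lo hi : Int) : Int :=
  if _h : lo ≤ hi then
    if canBeDivided A K (PySem.Int.floordiv (lo + hi) 2) then loopA A K lo (hi - 1)
    else loopA A K (lo + 1) hi
  else lo
termination_by (hi + 1 - lo).toNat
decreasing_by all_goals omega

def MinMaxDivision (K : Int) (M : Int) (A : List Int) : Int :=
  -- max(A): Python raises ValueError on the empty list; that case is excluded by Pre_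
  let floorSum := (PySem.List.max? A (fun y => y)).getD 0
  let topSum := A.sum
  loopA A K floorSum topSum

-- ===== PORT B =====
-- B's block counter: one fold over A carrying the (current_sum, block_count) state pair
def blocksB (A : List Int) (cap : Int) : Int :=
  (A.foldl (fun (st : Int × Int) e =>
      if st.1 + e > cap then (e, st.2 + 1) else (st.1 + e, st.2)) (0, 1)).2

-- B's while loop: half-open binary search on [lo, hi), jumping hi to mid / lo to mid + 1
def searchB (A : List Int) (K : Int) (lo hi : Int) : Int :=
  if _h : lo < hi then
    let mid := lo + PySem.Int.floordiv (hi - lo) 2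
    if blocksB A mid ≤ K then searchB A K lo mid
    else searchB A K (mid + 1) hi
  else lo
termination_by (hi - lo).toNat
decreasing_by
  all_goals
    have := PySem.Int.floordiv_eq_ediv_of_pos (a := hi - lo) (b := 2) (by omega)
    omega

def MinMaxDivision_alt (K : Int) (M : Int) (A : List Int) : Int :=
  searchB A K ((PySem.List.max? A (fun y => y)).getD 0) (A.sum + 1)

-- ===== PRECONDITION & SPEC =====
-- Pre_ excludes the empty list (A's max(A) raises ValueError there, and so does B's) and lists with
-- a negative element, where the greedy feasibility test is non-monotone so the value either search
-- converges to is an unspecified accident (the Codility problem states 0 ≤ A[i] ≤ M).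
def Pre_MinMaxDivision (K : Int) (M : Int) (A : List Int) : Prop :=
  A ≠ [] ∧ ∀ x ∈ A, 0 ≤ x
instance (K : Int) (M : Int) (A : List Int) : Decidable (Pre_MinMaxDivision K M A) := by
  unfold Pre_MinMaxDivision; infer_instance

def pvWitness_MinMaxDivision : Int × Int × List Int := (2, 0, [1, 2, 3])

def Spec_MinMaxDivision (K : Int) (M : Int) (A : List Int) (out : Int) : Prop := out = MinMaxDivision_alt K M A
instance (K : Int) (M : Int) (A : List Int) (out : Int) : Decidable (Spec_MinMaxDivision K M A out) := by unfold Spec_MinMaxDivision; infer_instance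

-- ===== CLAIM (what is proved, stated in full; the proofs are below) =====
def Claim_equal_MinMaxDivision : Prop := ∀ (K : Int) (M : Int) (A : List Int), Dom_MinMaxDivision K M A → Pre_MinMaxDivision K M A → Spec_MinMaxDivision K M A (MinMaxDivision K M A)

-- ===== LEMMAS AND PROOFS =====

-- reference greedy scan: final (sum, count) pair shared by both programs' tests
def greedy (cap : Int) : List Int → Int → Int → Int × Int
  | [], s, c => (s, c)
  | e :: rest, s, c =>
    if s + e > cap then greedy cap rest e (c + 1) else greedy cap rest (s + e) c

theorem greedy_count_le (cap : Int) (l : List Int) (s c : Int) :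
    c ≤ (greedy cap l s c).2 := by
  induction l generalizing s c with
  | nil => simp [greedy]
  | cons e rest ih =>
    simp only [greedy]
    split
    · exact le_trans (by omega) (ih e (c + 1))
    · exact ih (s + e) c

theorem canGo_iff (K cap : Int) (l : List Int) (s c : Int) :
    canBeDividedGo K cap l s c = true ↔ (l = [] ∨ (greedy cap l s c).2 < K) := by
  induction l generalizing s c with
  | nil => simp [canBeDividedGo]
  | cons e rest ih =>
    simp only [canBeDividedGo, greedy]
    by_cases hb : s + e > cap
    · simp only [if_pos hb]
      by_cases hk : c + 1 ≥ K
      · have := greedy_count_le cap rest e (c + 1)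
        simp only [if_pos hk]
        constructor
        · intro h; cases h
        · rintro (h | h)
          · cases h
          · omega
      · simp only [if_neg hk]
        rw [ih]
        constructor
        · rintro (h | h)
          · right; subst h; simp [greedy]; omega
          · right; exact h
        · rintro (h | h)
          · cases h
          · rcases eq_or_ne rest [] with he | he
            · left; exact he
            · right; exact h
    · simp only [if_neg hb]
      by_cases hk : c ≥ K
      · have := greedy_count_le cap rest (s + e) c
        simp only [if_pos hk]
        constructor
        · intro h; cases h
        · rintro (h | h)
          · cases h
          · omega
      · simp only [if_neg hk]
        rw [ih]
        constructor
        · rintro (h | h)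
          · right; subst h; simp [greedy]; omega
          · right; exact h
        · rintro (h | h)
          · cases h
          · rcases eq_or_ne rest [] with he | he
            · left; exact he
            · right; exact h

-- B's fold is the reference greedy scan
theorem foldl_eq_greedy (cap : Int) (l : List Int) (s c : Int) :
    l.foldl (fun (st : Int × Int) e =>
      if st.1 + e > cap then (e, st.2 + 1) else (st.1 + e, st.2)) (s, c) = greedy cap l s c := by
  induction l generalizing s c with
  | nil => simp [greedy]
  | cons e rest ih =>
    simp only [List.foldl, greedy]
    split <;> simp_all

theorem greedy_count_shift (cap : Int) (l : List Int) (s c d : Int) :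
    (greedy cap l s (c + d)).2 = (greedy cap l s c).2 + d := by
  induction l generalizing s c with
  | nil => simp [greedy]
  | cons e rest ih =>
    simp only [greedy]
    split
    · rw [show c + d + 1 = (c + 1) + d by ring]
      exact ih e (c + 1)
    · exact ih (s + e) c

-- the two programs' feasibility tests agree on nonempty lists
theorem test_eq (A : List Int) (K : Int) (hA : A ≠ []) (cap : Int) :
    (blocksB A cap ≤ K) ↔ canBeDivided A K cap = true := by
  rw [canBeDivided, canGo_iff, blocksB, foldl_eq_greedy]
  have h01 : (greedy cap A 0 1).2 = (greedy cap A 0 0).2 + 1 := by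
    have := greedy_count_shift cap A 0 0 1; simpa using this
  constructor
  · intro h; right; omega
  · rintro (h | h)
    · exact absurd h hA
    · omega

-- lexicographic invariant: a larger cap never needs more blocks (nonnegative elements)
theorem greedy_mono (x y : Int) (hxy : x ≤ y) (l : List Int) (hnn : ∀ e ∈ l, 0 ≤ e) :
    ∀ sx sy cx cy, 0 ≤ sx → 0 ≤ sy → (cy < cx ∨ (cy = cx ∧ sy ≤ sx)) →
      0 ≤ (greedy x l sx cx).1 ∧ 0 ≤ (greedy y l sy cy).1 ∧
      ((greedy y l sy cy).2 < (greedy x l sx cx).2 ∨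
       ((greedy y l sy cy).2 = (greedy x l sx cx).2 ∧ (greedy y l sy cy).1 ≤ (greedy x l sx cx).1)) := by
  induction l with
  | nil => intro sx sy cx cy h1 h2 h3; simpa [greedy] using ⟨h1, h2, h3⟩
  | cons e rest ih =>
    intro sx sy cx cy h1 h2 h3
    have he : 0 ≤ e := hnn e (by simp)
    have hnn' : ∀ e ∈ rest, 0 ≤ e := fun a ha => hnn a (by simp [ha])
    simp only [greedy]
    by_cases hx : sx + e > x <;> by_cases hy : sy + e > y <;>
      simp only [if_pos, hx, hy, ite_false]
    · exact ih hnn' e e (cx + 1) (cy + 1) he he (by omega)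
    · exact ih hnn' e (sy + e) (cx + 1) cy (by omega) (by omega) (by omega)
    · -- x does not break but y does: forces sy > sx hence cy < cx
      have : cy < cx := by omega
      exact ih hnn' (sx + e) e cx (cy + 1) (by omega) (by omega) (by omega)
    · exact ih hnn' (sx + e) (sy + e) cx cy (by omega) (by omega) (by omega)

theorem can_mono (A : List Int) (K : Int) (hnn : ∀ e ∈ A, 0 ≤ e) :
    ∀ x y, x ≤ y → canBeDivided A K x = true → canBeDivided A K y = true := by
  intro x y hxy hx
  rcases eq_or_ne A [] with rfl | hA
  · simp [canBeDivided, canBeDividedGo]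
  · rw [canBeDivided, canGo_iff] at hx ⊢
    have hm := greedy_mono x y hxy A hnn 0 0 0 0 le_rfl le_rfl (by omega)
    rcases hx with h | h
    · exact absurd h hA
    · right; omega

-- characterization of A's loop (for a monotone test)
theorem loopA_char (A : List Int) (K : Int)
    (hm : ∀ x y, x ≤ y → canBeDivided A K x = true → canBeDivided A K y = true) :
    ∀ n lo hi, (hi + 1 - lo).toNat = n → lo ≤ hi + 1 →
      lo ≤ loopA A K lo hi ∧ loopA A K lo hi ≤ hi + 1 ∧
      (∀ z, lo ≤ z → z < loopA A K lo hi → canBeDivided A K z = false) ∧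
      (loopA A K lo hi ≤ hi → canBeDivided A K (loopA A K lo hi) = true) := by
  intro n
  induction n using Nat.strong_induction_on with
  | _ n ih =>
    intro lo hi hn hle
    rw [loopA]
    by_cases h : lo ≤ hi
    · have hmid := PySem.Int.floordiv_two_mid_bounds (lo := lo) (hi := hi) h
      set mid := PySem.Int.floordiv (lo + hi) 2 with hmiddef
      by_cases ht : canBeDivided A K mid = true
      · simp only [dif_pos h, if_pos ht]
        obtain ⟨p1, p2, p3, p4⟩ := ih (hi - 1 + 1 - lo).toNat (by omega) lo (hi - 1) rfl (by omega)
        refine ⟨p1, by omega, p3, fun hfin => ?_⟩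
        rcases lt_or_ge (loopA A K lo (hi - 1)) hi with hlt | hge
        · exact p4 (by omega)
        · have : loopA A K lo (hi - 1) = hi := by omega
          rw [this]
          exact hm mid hi (by omega) ht
      · simp only [dif_pos h, if_neg ht]
        obtain ⟨p1, p2, p3, p4⟩ := ih (hi + 1 - (lo + 1)).toNat (by omega) (lo + 1) hi rfl (by omega)
        refine ⟨by omega, p2, fun z hz1 hz2 => ?_, p4⟩
        rcases lt_or_ge z (lo + 1) with hzlo | hzlo
        · have hzeq : z = lo := by omega
          subst hzeq
          rcases hc : canBeDivided A K z with _ | _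
          · rfl
          · exact absurd (hm z mid (by omega) hc) ht
        · exact p3 z hzlo hz2
    · simp only [dif_neg h]
      exact ⟨le_rfl, by omega, by omega, by omega⟩

-- characterization of B's half-open search (same test vocabulary, via test_eq)
theorem searchB_char (A : List Int) (K : Int)
    (heq : ∀ cap, (blocksB A cap ≤ K) ↔ canBeDivided A K cap = true)
    (hm : ∀ x y, x ≤ y → canBeDivided A K x = true → canBeDivided A K y = true) :
    ∀ n lo hi, (hi - lo).toNat = n → lo ≤ hi →
      lo ≤ searchB A K lo hi ∧ searchB A K lo hi ≤ hi ∧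
      (∀ z, lo ≤ z → z < searchB A K lo hi → canBeDivided A K z = false) ∧
      (searchB A K lo hi < hi → canBeDivided A K (searchB A K lo hi) = true) := by
  intro n
  induction n using Nat.strong_induction_on with
  | _ n ih =>
    intro lo hi hn hle
    rw [searchB]
    by_cases h : lo < hi
    · have hfd := PySem.Int.floordiv_eq_ediv_of_pos (a := hi - lo) (b := 2) (by omega)
      set mid := lo + PySem.Int.floordiv (hi - lo) 2 with hmiddef
      have hmb : lo ≤ mid ∧ mid < hi := by rw [hmiddef, hfd]; omega
      by_cases ht : blocksB A mid ≤ K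
      · have htc : canBeDivided A K mid = true := (heq mid).mp ht
        simp only [dif_pos h, if_pos ht]
        obtain ⟨p1, p2, p3, p4⟩ := ih (mid - lo).toNat (by omega) lo mid rfl (by omega)
        refine ⟨p1, by omega, p3, fun _ => ?_⟩
        rcases lt_or_ge (searchB A K lo mid) mid with hlt | hge
        · exact p4 hlt
        · have : searchB A K lo mid = mid := by omega
          rw [this]; exact htc
      · have htc : ¬ canBeDivided A K mid = true := fun hc => ht ((heq mid).mpr hc)
        simp only [dif_pos h, if_neg ht]
        obtain ⟨p1, p2, p3, p4⟩ := ih (hi - (mid + 1)).toNat (by omega) (mid + 1) hi rfl (by omega)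
        refine ⟨by omega, p2, fun z hz1 hz2 => ?_, p4⟩
        rcases lt_or_ge z (mid + 1) with hzlo | hzlo
        · rcases hc : canBeDivided A K z with _ | _
          · rfl
          · exact absurd (hm z mid (by omega) hc) htc
        · exact p3 z hzlo hz2
    · simp only [dif_neg h]
      exact ⟨le_rfl, by omega, by omega, by omega⟩

-- ===== VERDICT (by name: the statement is the Claim_ definition above) =====
theorem MinMaxDivision_spec : Claim_equal_MinMaxDivision := by
  intro K M A _hdom hpre
  obtain ⟨hA, hnn⟩ := hpre
  unfold Spec_MinMaxDivision MinMaxDivision MinMaxDivision_alt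
  obtain ⟨m, hmeq⟩ : ∃ m, PySem.List.max? A (fun y => y) = some m := by
    cases hmx : PySem.List.max? A (fun y => y) with
    | none => exact absurd ((PySem.List.max?_eq_none_iff A (fun y => y)).mp hmx) hA
    | some m => exact ⟨m, rfl⟩
  have hmem : m ∈ A := PySem.List.max?_mem hmeq
  have hsum : m ≤ A.sum := List.single_le_sum hnn m hmem
  rw [hmeq]
  simp only [Option.getD_some]
  have hm := can_mono A K hnn
  have heq := test_eq A K hA
  obtain ⟨a1, a2, a3, a4⟩ := loopA_char A K hm _ m A.sum rfl (by omega)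
  obtain ⟨b1, b2, b3, b4⟩ := searchB_char A K heq hm _ m (A.sum + 1) rfl (by omega)
  set rA := loopA A K m A.sum
  set rB := searchB A K m (A.sum + 1)
  rcases lt_trichotomy rA rB with hlt | heq' | hlt
  · have hPA : canBeDivided A K rA = true := a4 (by omega)
    have : canBeDivided A K rA = false := b3 rA (by omega) hlt
    simp [this] at hPA
  · exact heq'
  · have hPB : canBeDivided A K rB = true := b4 (by omega)
    have : canBeDivided A K rB = false := a3 rB (by omega) hlt
    simp [this] at hPB
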